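-- pv_equiv track=rewrite | github.com/rajesh241/libtech | includes/broadcastFunctions.py | gettringoaudio
-- ===== SOURCE A (Python) =====
-- def gettringoaudio(rawlist):
--   tringofilelist=rawlist.rstrip(',')
--   tringoArray=tringofilelist.split(',')
--   noOfFiles=len(tringoArray)
--   i=0
--   tringoaudio=''
--   while(i<20):
--     curFileID='27503'
--     if(i < noOfFiles):
--       curFileID=tringoArray[i]
--     i=i+1
--     tringoaudio+="&fileid"+str(i)+"="+curFileID
--   return tringoaudio
-- ===== SOURCE B (Python) =====
-- def gettringoaudio(rawlist):
--     # streaming single scan over the characters: no split(), no index table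
--     s = rawlist.rstrip(',')
--     out = '&fileid1='
--     k = 1
--     for ch in s:
--         if ch == ',':
--             if k == 20:
--                 break
--             k += 1
--             out += '&fileid' + str(k) + '='
--         else:
--             out += ch
--     for j in range(k + 1, 21):
--         out += '&fileid' + str(j) + '=27503'
--     return out
-- ===== Notes on version B (the rewrite author's own statement) =====
-- stated objective: alternative
-- what changed: B replaces A's split-into-array-then-index-it-20-times loop by a single streaming scan over the raw characters (emitting '&fileidK=' headers at commas, copying value characters, breaking at the 20th piece) followed by a padding loop of '27503' defaults; no split() and no array indexing remain.
import Mathlib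
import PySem

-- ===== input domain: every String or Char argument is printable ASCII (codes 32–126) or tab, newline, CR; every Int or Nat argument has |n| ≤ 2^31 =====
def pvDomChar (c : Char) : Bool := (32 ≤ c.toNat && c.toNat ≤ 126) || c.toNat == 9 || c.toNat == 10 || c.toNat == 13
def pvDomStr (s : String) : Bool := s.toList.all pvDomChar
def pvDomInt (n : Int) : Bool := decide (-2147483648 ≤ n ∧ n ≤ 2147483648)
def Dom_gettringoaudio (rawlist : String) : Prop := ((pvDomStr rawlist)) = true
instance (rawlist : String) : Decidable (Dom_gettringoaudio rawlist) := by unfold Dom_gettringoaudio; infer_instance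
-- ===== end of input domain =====

-- B replaces A's split-then-index-20-times loop by a single streaming character scan
-- (emit headers at commas, copy value chars, then pad defaults); alternative decomposition, same cost.

-- rstrip(',') ported by hand (exact: drops exactly the trailing ',' characters)
def pvRstripComma (cs : List Char) : List Char := (cs.reverse.dropWhile (· == ',')).reverse

-- ===== PORT A =====
def gettringoaudio (rawlist : String) : String :=
  let tringofilelist := pvRstripComma rawlist.toList
  let tringoArray := PySem.Chars.splitOn tringofilelist [',']
  let noOfFiles := tringoArray.length
  -- while(i<20) with i := i+1 each step, ported as a fold over List.range 20
  let tringoaudio := (List.range 20).foldl (fun acc i =>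
    let curFileID := if i < noOfFiles then PySem.List.pyGetD tringoArray (i : Int) [] else ['2','7','5','0','3']
    acc ++ (['&','f','i','l','e','i','d'] ++ PySem.Int.toChars ((i : Int) + 1) ++ ['='] ++ curFileID)) []
  String.mk tringoaudio

-- ===== PORT B =====
-- '&fileid' + str(j) + '='
def pvHdr (j : Int) : List Char := ['&','f','i','l','e','i','d'] ++ PySem.Int.toChars j ++ ['=']

-- the 'for ch in s' loop of Source B (with its break): returns (out, k) after the loop
def pvScan : List Char → Nat → List Char → List Char × Nat
  | [], k, acc => (acc, k)
  | c :: rest, k, acc =>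
    if c = ',' then
      if k = 20 then (acc, k)
      else pvScan rest (k + 1) (acc ++ pvHdr ((k : Int) + 1))
    else pvScan rest k (acc ++ [c])

def gettringoaudio_alt (rawlist : String) : String :=
  let s := pvRstripComma rawlist.toList
  let p := pvScan s 1 (pvHdr 1)
  -- for j in range(k+1, 21): out += '&fileid'+str(j)+'=27503'
  String.mk ((PySem.List.pyRange ((p.2 : Int) + 1) 21 1).foldl
    (fun a j => a ++ (pvHdr j ++ ['2','7','5','0','3'])) p.1)

-- ===== PRECONDITION & SPEC =====
def Spec_gettringoaudio (rawlist : String) (out : String) : Prop := out = gettringoaudio_alt rawlist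
instance (rawlist : String) (out : String) : Decidable (Spec_gettringoaudio rawlist out) := by unfold Spec_gettringoaudio; infer_instance

-- ===== CLAIM (what is proved, stated in full; the proofs are below) =====
def Claim_equal_gettringoaudio : Prop := ∀ (rawlist : String), Dom_gettringoaudio rawlist → Spec_gettringoaudio rawlist (gettringoaudio rawlist)

-- ===== LEMMAS AND PROOFS =====

def pvDflt : List Char := ['2','7','5','0','3']

-- splitOn on a single ',' as a plain structural recursion (pre = current piece so far)
def pvParts : List Char → List Char → List (List Char)
  | pre, [] => [pre]
  | pre, c :: rest => if c = ',' then pre :: pvParts [] rest else pvParts (pre ++ [c]) rest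

-- default segments for fileids k+1 .. 20
def pvPads (k : Nat) : List Char :=
  ((List.range (20 - k)).map (fun (t : Nat) => pvHdr ((k : Int) + 1 + (t : Int)) ++ pvDflt)).flatten

-- what the scan-and-pad produces after the current header, from piece number k on
def pvR : Nat → List (List Char) → List Char
  | _, [] => []
  | k, [p] => p ++ pvPads k
  | k, p :: q :: qs => p ++ (if k = 20 then [] else pvHdr ((k : Int) + 1) ++ pvR (k + 1) (q :: qs))

lemma pvParts_ne_nil : ∀ (l pre : List Char), pvParts pre l ≠ [] := by
  intro l
  induction l with
  | nil => intro pre; simp [pvParts]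
  | cons c rest ih =>
    intro pre
    by_cases h : c = ','
    · simp [pvParts, h]
    · simpa [pvParts, h] using ih (pre ++ [c])

lemma go_eq : ∀ (fuel : Nat) (l cur : List Char) (acc : List (List Char)), l.length < fuel →
    PySem.Chars.splitOn.go [','] fuel l cur acc = acc.reverse ++ pvParts cur.reverse l := by
  intro fuel
  induction fuel with
  | zero => intro l cur acc h; omega
  | succ f ih =>
    intro l cur acc h
    cases l with
    | nil => simp [PySem.Chars.splitOn.go, pvParts]
    | cons c rest =>
      by_cases hc : c = ','
      · subst hc
        rw [show PySem.Chars.splitOn.go [','] (f+1) (',' :: rest) cur acc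
              = PySem.Chars.splitOn.go [','] f rest [] (cur.reverse :: acc) by
            simp [PySem.Chars.splitOn.go, List.isPrefixOf]]
        rw [ih rest [] (cur.reverse :: acc) (by simpa using Nat.lt_of_succ_lt_succ h)]
        simp [pvParts]
      · have hpre : ([','].isPrefixOf (c :: rest)) = false := by
          simp [List.isPrefixOf]; exact fun h => hc h.symm
        rw [show PySem.Chars.splitOn.go [','] (f+1) (c :: rest) cur acc
              = PySem.Chars.splitOn.go [','] f rest (c :: cur) acc by
            simp [PySem.Chars.splitOn.go, hpre]]
        rw [ih rest (c :: cur) acc (by simpa using Nat.lt_of_succ_lt_succ h)]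
        simp [pvParts, hc]

lemma splitOn_comma (l : List Char) : PySem.Chars.splitOn l [','] = pvParts [] l := by
  unfold PySem.Chars.splitOn
  rw [go_eq (l.length + 1) l [] [] (by omega)]
  simp

lemma pvParts_pre : ∀ (l pre p : List Char) (ps : List (List Char)),
    pvParts [] l = p :: ps → pvParts pre l = (pre ++ p) :: ps := by
  intro l
  induction l with
  | nil => intro pre p ps h; simp [pvParts] at h ⊢; simp [h.1.symm, h.2.symm]
  | cons c rest ih =>
    intro pre p ps h
    by_cases hc : c = ','
    · simp [pvParts, hc] at h ⊢
      exact ⟨by simp [← h.1], h.2⟩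
    · have hstep : pvParts pre (c :: rest) = pvParts (pre ++ [c]) rest := by simp [pvParts, hc]
      have hstep0 : pvParts [] (c :: rest) = pvParts [c] rest := by simp [pvParts, hc]
      rw [hstep0] at h
      cases hrest : pvParts [] rest with
      | nil => exact absurd hrest (pvParts_ne_nil rest [])
      | cons p' ps' =>
        rw [ih [c] p' ps' hrest] at h
        injection h with h1 h2
        rw [hstep, ih (pre ++ [c]) p' ps' hrest, ← h1, ← h2]
        simp

lemma pvPads_twenty : pvPads 20 = [] := by simp [pvPads]

lemma pvR_cons_char (k : Nat) (c : Char) (p : List Char) (ps : List (List Char)) :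
    pvR k ((c :: p) :: ps) = c :: pvR k (p :: ps) := by
  cases ps <;> simp [pvR]

lemma scan_eq : ∀ (l : List Char) (k : Nat) (acc : List Char), k ≤ 20 →
    (pvScan l k acc).1 ++ pvPads (pvScan l k acc).2 = acc ++ pvR k (pvParts [] l) := by
  intro l
  induction l with
  | nil => intro k acc hk; simp [pvScan, pvParts, pvR]
  | cons c rest ih =>
    intro k acc hk
    by_cases hc : c = ','
    · subst hc
      obtain ⟨p, ps, hps⟩ : ∃ p ps, pvParts [] rest = p :: ps := by
        cases h : pvParts [] rest with
        | nil => exact absurd h (pvParts_ne_nil rest [])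
        | cons p ps => exact ⟨p, ps, rfl⟩
      by_cases h20 : k = 20
      · subst h20
        simp [pvScan, pvParts, hps, pvR, pvPads_twenty]
      · rw [show pvScan (',' :: rest) k acc = pvScan rest (k + 1) (acc ++ pvHdr ((k : Int) + 1)) by
            simp [pvScan, h20]]
        rw [ih (k + 1) (acc ++ pvHdr ((k : Int) + 1)) (by omega)]
        simp [pvParts, hps, pvR, h20]
    · rw [show pvScan (c :: rest) k acc = pvScan rest k (acc ++ [c]) by simp [pvScan, hc]]
      rw [ih k (acc ++ [c]) hk]
      obtain ⟨p, ps, hps⟩ : ∃ p ps, pvParts [] rest = p :: ps := by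
        cases h : pvParts [] rest with
        | nil => exact absurd h (pvParts_ne_nil rest [])
        | cons p ps => exact ⟨p, ps, rfl⟩
      have : pvParts [] (c :: rest) = (c :: p) :: ps := by
        simpa [pvParts, hc] using pvParts_pre rest [c] p ps hps
      rw [this, pvR_cons_char, hps]
      simp

lemma scan_k_le : ∀ (l : List Char) (k : Nat) (acc : List Char), k ≤ 20 →
    (pvScan l k acc).2 ≤ 20 := by
  intro l
  induction l with
  | nil => intro k acc hk; simpa [pvScan] using hk
  | cons c rest ih =>
    intro k acc hk
    by_cases hc : c = ','
    · by_cases h20 : k = 20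
      · simp [pvScan, hc, h20]
      · rw [show pvScan (c :: rest) k acc = pvScan rest (k + 1) (acc ++ pvHdr ((k : Int) + 1)) by
            simp [pvScan, hc, h20]]
        exact ih (k + 1) _ (by omega)
    · rw [show pvScan (c :: rest) k acc = pvScan rest k (acc ++ [c]) by simp [pvScan, hc]]
      exact ih k _ hk

lemma pyRange_pads (k : Nat) (hk : k ≤ 20) :
    PySem.List.pyRange ((k : Int) + 1) 21 1 = (List.range (20 - k)).map (fun (t : Nat) => (k : Int) + 1 + (t : Int)) := by
  rw [PySem.List.pyRange_of_pos _ _ (by omega : (0:Int) < 1)]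
  by_cases h : k = 20
  · subst h; norm_num
  · rw [if_pos (by omega)]
    have h1 : ((21 - ((k : Int) + 1) + 1 - 1) / 1).toNat = 20 - k := by omega
    rw [h1]
    refine List.map_congr_left fun t _ => ?_
    ring

lemma pads_flatMap (k : Nat) (hk : k ≤ 20) :
    (PySem.List.pyRange ((k : Int) + 1) 21 1).flatMap (fun j => pvHdr j ++ pvDflt) = pvPads k := by
  rw [pyRange_pads k hk, List.flatMap_map, pvPads, List.flatMap_def]

-- the canonical padded-segments form both sides reduce to
lemma pvR_canon : ∀ (ps : List (List Char)) (p : List Char) (k : Nat), 1 ≤ k → k ≤ 20 →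
    pvHdr (k : Int) ++ pvR k (p :: ps) =
    ((List.range (21 - k)).map (fun (t : Nat) =>
      pvHdr ((k : Int) + (t : Int)) ++ (if t < (p :: ps).length then (p :: ps).getD t [] else pvDflt))).flatten := by
  intro ps
  induction ps with
  | nil =>
    intro p k h1 h20
    have hr : 21 - k = (20 - k) + 1 := by omega
    rw [hr, List.range_succ_eq_map, List.map_cons, List.map_map, List.flatten_cons]
    simp only [pvR, pvPads]
    have : ((List.range (20 - k)).map ((fun (t : Nat) =>
        pvHdr ((k : Int) + (t : Int)) ++ if t < ([p] : List (List Char)).length then ([p] : List (List Char)).getD t [] else pvDflt) ∘ Nat.succ))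
        = (List.range (20 - k)).map (fun (t : Nat) => pvHdr ((k : Int) + 1 + (t : Int)) ++ pvDflt) := by
      refine List.map_congr_left fun t _ => ?_
      simp [Function.comp]
      congr 1
      ring
    rw [this]
    simp
  | cons q qs ih =>
    intro p k h1 h20
    by_cases h : k = 20
    · subst h
      norm_num [pvR]
    · have hr : 21 - k = (20 - k) + 1 := by omega
      rw [hr, List.range_succ_eq_map, List.map_cons, List.map_map, List.flatten_cons]
      have hih := ih q (k + 1) (by omega) (by omega)
      have hmap : ((List.range (20 - k)).map ((fun (t : Nat) =>
          pvHdr ((k : Int) + (t : Int)) ++ if t < (p :: q :: qs).length then (p :: q :: qs).getD t [] else pvDflt) ∘ Nat.succ))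
          = (List.range (21 - (k + 1))).map (fun (t : Nat) =>
            pvHdr (((k + 1 : Nat) : Int) + (t : Int)) ++ if t < (q :: qs).length then (q :: qs).getD t [] else pvDflt) := by
        have hlen : 20 - k = 21 - (k + 1) := by omega
        rw [hlen]
        refine List.map_congr_left fun t _ => ?_
        simp only [Function.comp]
        congr 1
        · congr 1; push_cast; ring
        · simp
      rw [hmap, ← hih]
      simp [pvR, h]

-- ===== VERDICT (by name: the statement is the Claim_ definition above) =====
theorem gettringoaudio_spec : Claim_equal_gettringoaudio := by
  intro rawlist _
  unfold Spec_gettringoaudio gettringoaudio gettringoaudio_alt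
  dsimp only
  set s := pvRstripComma rawlist.toList with hs
  -- B side: fold → pads, scan → pvR, then canonical form
  rw [PySem.List.foldl_append_eq_flatMap, PySem.List.foldl_append_eq_flatMap,
      show (['2','7','5','0','3'] : List Char) = pvDflt from rfl,
      pads_flatMap _ (scan_k_le s 1 (pvHdr 1) (by omega)),
      scan_eq s 1 (pvHdr 1) (by omega)]
  obtain ⟨p, ps, hps⟩ : ∃ p ps, pvParts [] s = p :: ps := by
    cases h : pvParts [] s with
    | nil => exact absurd h (pvParts_ne_nil s [])
    | cons p ps => exact ⟨p, ps, rfl⟩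
  rw [hps]
  have hcanon := pvR_canon ps p 1 (by omega) (by omega)
  simp only [Nat.cast_one, Nat.reduceSub] at hcanon
  rw [hcanon]
  -- A side: flatMap → same canonical map
  rw [List.nil_append, List.flatMap_def, splitOn_comma, hps]
  refine congrArg String.mk (congrArg List.flatten (List.map_congr_left fun i hi => ?_))
  have : PySem.List.pyGetD (p :: ps) (i : Int) [] = (p :: ps).getD i [] := by
    simp [PySem.List.pyGetD_natCast]
  rw [this]
  simp only [pvHdr, pvDflt]
  have h1i : (i : Int) + 1 = 1 + (i : Int) := by ring
  rw [h1i]
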